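-- pv_equiv track=rewrite | github.com/natanayalo/SeenemAll | api/routes/recommend.py | _normalize_streaming_services
-- ===== SOURCE A (Python) =====
-- from typing import Any, Dict, List, Optional, Tuple, Sequence, Set
--
-- _STREAMING_PROVIDER_ALIASES: Dict[str, Set[str]] = {
--     "netflix": {"netflix", "nfx"},
--     "disney_plus": {"disney_plus", "disney", "dnp"},
--     "prime_video": {"prime_video", "primevideo", "amazon", "amz", "amp"},
--     "hulu": {"hulu", "hlu"},
--     "max": {"max", "hbomax", "hbo", "hbm"},
--     "apple_tv_plus": {"apple_tv_plus", "appletvplus", "apple", "atp"},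
--     "paramount_plus": {"paramount_plus", "paramountplus", "prm", "pmnt", "paramount"},
-- }
--
-- def _normalize_streaming_services(
--     providers: Sequence[str] | None,
-- ) -> Set[str]:
--     normalized: Set[str] = set()
--     if not providers:
--         return normalized
--
--     for provider in providers:
--         if not isinstance(provider, str):
--             continue
--         key = provider.strip().lower()
--         if not key:
--             continue
--         matched = False
--         for canonical, variants in _STREAMING_PROVIDER_ALIASES.items():
--             all_aliases = variants.union({canonical})
--             if key in all_aliases:
--                 normalized.update(all_aliases)
--                 matched = True
--                 break
--         if not matched:
--             normalized.add(key)
--     return normalized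
-- ===== SOURCE B (Python) =====
-- from typing import Dict, List, Optional, Sequence, Set
--
-- _STREAMING_PROVIDER_ALIASES: Dict[str, Set[str]] = {
--     "netflix": {"netflix", "nfx"},
--     "disney_plus": {"disney_plus", "disney", "dnp"},
--     "prime_video": {"prime_video", "primevideo", "amazon", "amz", "amp"},
--     "hulu": {"hulu", "hlu"},
--     "max": {"max", "hbomax", "hbo", "hbm"},
--     "apple_tv_plus": {"apple_tv_plus", "appletvplus", "apple", "atp"},
--     "paramount_plus": {"paramount_plus", "paramountplus", "prm", "pmnt", "paramount"},
-- }
--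
-- # Reverse index built once at import: every alias of a group maps to the full group.
-- _ALIAS_INDEX: Dict[str, Set[str]] = {
--     alias: variants | {canonical}
--     for canonical, variants in _STREAMING_PROVIDER_ALIASES.items()
--     for alias in variants | {canonical}
-- }
--
--
-- def _normalize_streaming_services(
--     providers: Sequence[str] | None,
-- ) -> Set[str]:
--     # Expand-then-dedup: flatten every provider to its alias group (or to itself)
--     # in one comprehension; the set constructor does the deduplication at the end.
--     # No accumulator, no matched flag, no scan-and-break over the alias table.
--     if not providers:
--         return set()
--     return {
--         alias
--         for provider in providers
--         if isinstance(provider, str)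
--         for key in (provider.strip().lower(),)
--         if key
--         for alias in _ALIAS_INDEX.get(key, (key,))
--     }
-- ===== Notes on version B (the rewrite author's own statement) =====
-- stated objective: faster
-- what changed: B replaces A's single-pass accumulator loop with matched-flag and scan-and-break over the alias table by an expand-then-dedup strategy: one set comprehension flattens each provider to its whole alias group (looked up in a reverse index built once at import, defaulting to the key itself) and the set constructor deduplicates at the end.
import Mathlib
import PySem

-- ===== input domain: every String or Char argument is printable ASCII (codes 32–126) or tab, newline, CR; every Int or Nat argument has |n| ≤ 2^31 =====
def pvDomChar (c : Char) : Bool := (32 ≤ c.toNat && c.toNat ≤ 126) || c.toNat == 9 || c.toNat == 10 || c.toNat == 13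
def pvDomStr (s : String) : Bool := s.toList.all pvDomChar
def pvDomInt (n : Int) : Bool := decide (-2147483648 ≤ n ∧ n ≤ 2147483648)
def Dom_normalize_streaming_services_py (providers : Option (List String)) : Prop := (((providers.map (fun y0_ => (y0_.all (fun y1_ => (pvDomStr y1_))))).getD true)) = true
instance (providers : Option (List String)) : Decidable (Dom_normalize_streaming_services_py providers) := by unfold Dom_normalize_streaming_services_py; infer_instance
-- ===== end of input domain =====

-- B replaces A's accumulator loop with matched-flag and scan-and-break by an expand-then-dedup
-- set comprehension over a reverse index built once; same result, different decomposition.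
-- (Python returns a set; ports return the distinct elements in insertion order.)

-- the shared module constant _STREAMING_PROVIDER_ALIASES (variant sets in source-literal order)
def pvStreamingProviderAliases : List (String × List String) :=
  [("netflix", ["netflix", "nfx"]),
   ("disney_plus", ["disney_plus", "disney", "dnp"]),
   ("prime_video", ["prime_video", "primevideo", "amazon", "amz", "amp"]),
   ("hulu", ["hulu", "hlu"]),
   ("max", ["max", "hbomax", "hbo", "hbm"]),
   ("apple_tv_plus", ["apple_tv_plus", "appletvplus", "apple", "atp"]),
   ("paramount_plus", ["paramount_plus", "paramountplus", "prm", "pmnt", "paramount"])]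

-- ===== PORT A =====
-- A's inner 'for canonical, variants … break' loop: first entry whose alias set contains key
def pvScanAliases (key : String) : List (String × List String) → Option (PySem.Set String)
  | [] => none
  | (canonical, variants) :: rest =>
    let allAliases := PySem.Set.union (PySem.Set.ofList variants) [canonical]
    if PySem.Set.contains allAliases key then some allAliases else pvScanAliases key rest

-- the body of A's 'for provider in providers' loop, named for the proofs
def pvStepA (normalized : PySem.Set String) (provider : String) : PySem.Set String :=
  let key := PySem.Str.lower (PySem.Str.strip provider)
  if key = "" then normalized
  else
    match pvScanAliases key pvStreamingProviderAliases with
    | some allAliases => PySem.Set.update normalized allAliases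
    | none => PySem.Set.add normalized key

-- the 'isinstance(provider, str)' guard is vacuous under the List String typing and is dropped
def normalize_streaming_services_py (providers : Option (List String)) : List String :=
  match providers with
  | none => []
  | some ps =>
    if ps.isEmpty then [] else
    ps.foldl pvStepA PySem.Set.empty

-- ===== PORT B =====
-- the module-level reverse index _ALIAS_INDEX: every alias of a group maps to the full group
def pvAliasIndex : PySem.Dict String (PySem.Set String) :=
  pvStreamingProviderAliases.foldl (fun idx cv =>
    let group := PySem.Set.union (PySem.Set.ofList cv.2) [cv.1]
    group.foldl (fun idx al => idx.insert al group) idx) PySem.Dict.empty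

-- one provider's contribution to the comprehension: its alias group, or [key], or nothing
def pvExpand (provider : String) : List String :=
  let key := PySem.Str.lower (PySem.Str.strip provider)
  if key = "" then [] else (PySem.Dict.get? pvAliasIndex key).getD [key]

def normalize_streaming_services_py_alt (providers : Option (List String)) : List String :=
  match providers with
  | none => []
  | some ps =>
    if ps.isEmpty then [] else
    PySem.Set.ofList (ps.flatMap pvExpand)

-- ===== PRECONDITION & SPEC =====
def Spec_normalize_streaming_services_py (providers : Option (List String)) (out : List String) : Prop := out = normalize_streaming_services_py_alt providers
instance (providers : Option (List String)) (out : List String) : Decidable (Spec_normalize_streaming_services_py providers out) := by unfold Spec_normalize_streaming_services_py; infer_instance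

-- ===== CLAIM (what is proved, stated in full; the proofs are below) =====
def Claim_equal_normalize_streaming_services_py : Prop := ∀ (providers : Option (List String)), Dom_normalize_streaming_services_py providers → Spec_normalize_streaming_services_py providers (normalize_streaming_services_py providers)

-- ===== LEMMAS AND PROOFS =====
-- A's scan of the fixed table and B's reverse-index lookup agree on every key
lemma pvLookupAgree (key : String) :
    pvScanAliases key pvStreamingProviderAliases = PySem.Dict.get? pvAliasIndex key := by
  by_cases h0 : key = "netflix"
  · subst h0; decide
  by_cases h1 : key = "nfx"
  · subst h1; decide
  by_cases h2 : key = "disney_plus"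
  · subst h2; decide
  by_cases h3 : key = "disney"
  · subst h3; decide
  by_cases h4 : key = "dnp"
  · subst h4; decide
  by_cases h5 : key = "prime_video"
  · subst h5; decide
  by_cases h6 : key = "primevideo"
  · subst h6; decide
  by_cases h7 : key = "amazon"
  · subst h7; decide
  by_cases h8 : key = "amz"
  · subst h8; decide
  by_cases h9 : key = "amp"
  · subst h9; decide
  by_cases h10 : key = "hulu"
  · subst h10; decide
  by_cases h11 : key = "hlu"
  · subst h11; decide
  by_cases h12 : key = "max"
  · subst h12; decide
  by_cases h13 : key = "hbomax"
  · subst h13; decide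
  by_cases h14 : key = "hbo"
  · subst h14; decide
  by_cases h15 : key = "hbm"
  · subst h15; decide
  by_cases h16 : key = "apple_tv_plus"
  · subst h16; decide
  by_cases h17 : key = "appletvplus"
  · subst h17; decide
  by_cases h18 : key = "apple"
  · subst h18; decide
  by_cases h19 : key = "atp"
  · subst h19; decide
  by_cases h20 : key = "paramount_plus"
  · subst h20; decide
  by_cases h21 : key = "paramountplus"
  · subst h21; decide
  by_cases h22 : key = "prm"
  · subst h22; decide
  by_cases h23 : key = "pmnt"
  · subst h23; decide
  by_cases h24 : key = "paramount"
  · subst h24; decide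
  simp [pvScanAliases, pvStreamingProviderAliases, pvAliasIndex, PySem.Set.contains,
    PySem.Set.union, PySem.Set.ofList, PySem.Set.add, PySem.Set.update, PySem.Dict.get?,
    PySem.Dict.insert, PySem.Dict.empty, h0, h1, h2, h3, h4, h5, h6, h7, h8, h9, h10, h11, h12, h13, h14, h15, h16, h17, h18, h19, h20, h21, h22, h23, h24]
  exact ⟨fun h => h0 h.symm, fun h => h1 h.symm, fun h => h2 h.symm, fun h => h3 h.symm, fun h => h4 h.symm, fun h => h5 h.symm, fun h => h6 h.symm, fun h => h7 h.symm, fun h => h8 h.symm, fun h => h9 h.symm, fun h => h10 h.symm, fun h => h11 h.symm, fun h => h12 h.symm, fun h => h13 h.symm, fun h => h14 h.symm, fun h => h15 h.symm, fun h => h16 h.symm, fun h => h17 h.symm, fun h => h18 h.symm, fun h => h19 h.symm, fun h => h20 h.symm, fun h => h21 h.symm, fun h => h22 h.symm, fun h => h23 h.symm, fun h => h24 h.symm⟩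

-- Set.update over an append splits (update = foldl add)
lemma pvUpdateAppend (s : PySem.Set String) (xs ys : List String) :
    PySem.Set.update s (xs ++ ys) = PySem.Set.update (PySem.Set.update s xs) ys := by
  simp [PySem.Set.update, List.foldl_append]

-- one step of A's loop = one update with B's expansion of that provider
lemma pvStepEq (acc : PySem.Set String) (key : String) :
    (if key = "" then acc
     else
       match pvScanAliases key pvStreamingProviderAliases with
       | some allAliases => PySem.Set.update acc allAliases
       | none => PySem.Set.add acc key)
    = PySem.Set.update acc (if key = "" then [] else (PySem.Dict.get? pvAliasIndex key).getD [key]) := by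
  rw [pvLookupAgree]
  by_cases hk : key = ""
  · rw [if_pos hk, if_pos hk]; rfl
  · rw [if_neg hk, if_neg hk]
    cases h : PySem.Dict.get? pvAliasIndex key with
    | none => simp only [Option.getD]; rfl
    | some g => simp only [Option.getD]

-- one step of A's loop, stated on the named helpers
lemma pvStepEqA (acc : PySem.Set String) (p : String) :
    pvStepA acc p = PySem.Set.update acc (pvExpand p) := by
  unfold pvStepA pvExpand
  exact pvStepEq acc (PySem.Str.lower (PySem.Str.strip p))

-- A's accumulator loop computes exactly B's expand-then-dedup, relative to any accumulator
lemma pvLoopEqUpdateFlatMap (ps : List String) (acc : PySem.Set String) :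
    ps.foldl pvStepA acc = PySem.Set.update acc (ps.flatMap pvExpand) := by
  induction ps generalizing acc with
  | nil => rw [List.flatMap_nil, List.foldl_nil]; rfl
  | cons p ps ih =>
    rw [List.foldl_cons, ih, List.flatMap_cons, pvUpdateAppend, pvStepEqA]

-- ===== VERDICT (by name: the statement is the Claim_ definition above) =====
theorem normalize_streaming_services_py_spec : Claim_equal_normalize_streaming_services_py := by
  intro providers _
  unfold Spec_normalize_streaming_services_py
  cases providers with
  | none => rfl
  | some ps =>
    simp only [normalize_streaming_services_py, normalize_streaming_services_py_alt]
    split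
    · rfl
    · rw [pvLoopEqUpdateFlatMap]
      simp [PySem.Set.ofList, PySem.Set.update, PySem.Set.empty]
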